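-- pv_equiv track=rewrite | github.com/shuang2099/Auto-evacuation-network-modeling-tool | evac_tool/_internal/moduels/Evac_visual.py | calculate_manhattan_distances
-- ===== SOURCE A (Python) =====
-- def calculate_manhattan_distances(movement_paths, threshold):
--     num_paths = len(movement_paths)
--     result = []
--
--     for i in range(num_paths):
--         path_result = []
--         for t in range(len(movement_paths[i])):
--             current_point = movement_paths[i][t]
--             count = 0
--             for j in range(num_paths):
--                 if j != i and t < len(movement_paths[j]):
--                     point_to_compare = movement_paths[j][t]
--                     distance = abs(current_point[0] - point_to_compare[0]) + abs(
--                         current_point[1] - point_to_compare[1])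
--                     if distance < threshold:
--                         count += 1
--             path_result.append(count)
--         result.append(path_result)
--
--     return result
-- ===== SOURCE B (Python) =====
-- def calculate_manhattan_distances(movement_paths, threshold):
--     # Time-major sweep: for each timestep build the column of active paths in
--     # rotated (Chebyshev) coordinates u=x+y, v=x-y, where the Manhattan test
--     # |dx|+|dy| < threshold becomes the box test |du| < threshold and |dv| < threshold,
--     # and extend every active path's row; finished paths are skipped entirely.
--     T = 0
--     for p in movement_paths:
--         T = max(T, len(p))
--     rows = [[] for _ in movement_paths]
--     for t in range(T):
--         active = []
--         for j, p in enumerate(movement_paths):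
--             if t < len(p):
--                 x, y = p[t]
--                 active.append((j, x + y, x - y))
--         new_rows = []
--         for i, p in enumerate(movement_paths):
--             if t < len(p):
--                 x, y = p[t]
--                 u, v = x + y, x - y
--                 c = 0
--                 for j, uj, vj in active:
--                     if j != i and abs(u - uj) < threshold and abs(v - vj) < threshold:
--                         c += 1
--                 new_rows.append(rows[i] + [c])
--             else:
--                 new_rows.append(rows[i])
--         rows = new_rows
--     return rows
-- ===== Notes on version B (the rewrite author's own statement) =====
-- stated objective: alternative
-- what changed: B replaces A's path-major triple loop (for every path, every timestep, rescan all paths with a length guard and two abs computations) by a time-major sweep: per timestep it builds the column of still-active paths once in rotated coordinates u=x+y, v=x-y (so the Manhattan test |dx|+|dy|<threshold becomes the Chebyshev box test |du|<threshold and |dv|<threshold, short-circuiting on the first axis) and extends every active row, skipping finished paths entirely.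
import Mathlib
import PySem

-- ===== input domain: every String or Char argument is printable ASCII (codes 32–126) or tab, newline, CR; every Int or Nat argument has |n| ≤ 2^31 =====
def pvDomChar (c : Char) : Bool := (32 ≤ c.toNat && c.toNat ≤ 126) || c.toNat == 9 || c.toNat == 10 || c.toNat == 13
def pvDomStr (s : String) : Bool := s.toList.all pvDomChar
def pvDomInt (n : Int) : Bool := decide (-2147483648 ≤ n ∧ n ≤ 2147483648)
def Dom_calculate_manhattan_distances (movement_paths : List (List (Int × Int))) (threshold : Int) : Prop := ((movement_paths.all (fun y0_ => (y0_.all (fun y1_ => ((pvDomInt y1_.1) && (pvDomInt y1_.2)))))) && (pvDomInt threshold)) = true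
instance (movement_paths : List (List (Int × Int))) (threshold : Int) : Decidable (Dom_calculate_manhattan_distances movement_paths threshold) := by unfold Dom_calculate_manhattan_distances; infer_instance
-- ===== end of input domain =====

-- B re-implements A as a time-major sweep over the active column in rotated (Chebyshev)
-- coordinates instead of A's path-major triple loop; objective: alternative structure, same value.


-- ===== PORT A =====
def calculate_manhattan_distances (movement_paths : List (List (Int × Int))) (threshold : Int) : List (List Int) :=
  let num_paths : Int := movement_paths.length
  (PySem.List.pyRange 0 num_paths 1).foldl (fun result i =>
    let path_i := PySem.List.pyGetD movement_paths i []
    let path_result := (PySem.List.pyRange 0 path_i.length 1).foldl (fun pr t =>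
      let current_point := PySem.List.pyGetD path_i t (0, 0)
      let count := (PySem.List.pyRange 0 num_paths 1).foldl (fun c j =>
        if j ≠ i ∧ t < ((PySem.List.pyGetD movement_paths j []).length : Int) then
          let point_to_compare := PySem.List.pyGetD (PySem.List.pyGetD movement_paths j []) t (0, 0)
          let distance := |current_point.1 - point_to_compare.1| + |current_point.2 - point_to_compare.2|
          if distance < threshold then c + 1 else c
        else c) (0 : Int)
      pr ++ [count]) ([] : List Int)
    result ++ [path_result]) []

-- ===== PORT B =====
def altCount (active : List (Int × Int × Int)) (threshold : Int) (i u v : Int) : Int :=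
  active.foldl (fun c e =>
    if e.1 ≠ i ∧ |u - e.2.1| < threshold ∧ |v - e.2.2| < threshold then c + 1 else c) 0

def calculate_manhattan_distances_alt (movement_paths : List (List (Int × Int))) (threshold : Int) : List (List Int) :=
  let T := movement_paths.foldl (fun a p => max a p.length) 0
  (List.range T).foldl (fun rows (t : Nat) =>
    let active := (PySem.List.enumerate movement_paths 0).foldl (fun acc jp =>
      if t < jp.2.length then
        let q := PySem.List.pyGetD jp.2 (t : Int) (0, 0)
        acc ++ [(jp.1, q.1 + q.2, q.1 - q.2)]
      else acc) []
    (PySem.List.enumerate movement_paths 0).foldl (fun nr ip =>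
      if t < ip.2.length then
        let q := PySem.List.pyGetD ip.2 (t : Int) (0, 0)
        nr ++ [PySem.List.pyGetD rows ip.1 [] ++
               [altCount active threshold ip.1 (q.1 + q.2) (q.1 - q.2)]]
      else nr ++ [PySem.List.pyGetD rows ip.1 []]) [])
    (movement_paths.map (fun _ => []))

-- ===== PRECONDITION & SPEC =====
def Spec_calculate_manhattan_distances (movement_paths : List (List (Int × Int))) (threshold : Int) (out : List (List Int)) : Prop := out = calculate_manhattan_distances_alt movement_paths threshold
instance (movement_paths : List (List (Int × Int))) (threshold : Int) (out : List (List Int)) : Decidable (Spec_calculate_manhattan_distances movement_paths threshold out) := by unfold Spec_calculate_manhattan_distances; infer_instance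

-- ===== CLAIM (what is proved, stated in full; the proofs are below) =====
def Claim_equal_calculate_manhattan_distances : Prop := ∀ (movement_paths : List (List (Int × Int))) (threshold : Int), Dom_calculate_manhattan_distances movement_paths threshold → Spec_calculate_manhattan_distances movement_paths threshold (calculate_manhattan_distances movement_paths threshold)

-- ===== LEMMAS AND PROOFS =====
-- reference closed form shared by both ports
def pvLen (paths : List (List (Int × Int))) (i : Nat) : Nat := (paths.getD i []).length

def pvPt (paths : List (List (Int × Int))) (i t : Nat) : Int × Int := (paths.getD i []).getD t (0, 0)

def pvCnt (paths : List (List (Int × Int))) (threshold : Int) (i t : Nat) : Int :=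
  ((List.range paths.length).countP (fun j =>
    decide (j ≠ i ∧ t < pvLen paths j ∧
      |(pvPt paths i t).1 - (pvPt paths j t).1| + |(pvPt paths i t).2 - (pvPt paths j t).2| < threshold)) : Nat)

def pvClosed (paths : List (List (Int × Int))) (threshold : Int) : List (List Int) :=
  (List.range paths.length).map (fun i => (List.range (pvLen paths i)).map (fun t => pvCnt paths threshold i t))

-- Manhattan ↔ rotated (Chebyshev) box test
lemma pv_cheb (a b th : Int) : (|a| + |b| < th) ↔ (|a + b| < th ∧ |a - b| < th) := by
  rcases abs_cases a with ⟨h1, h2⟩ | ⟨h1, h2⟩ <;> rcases abs_cases b with ⟨h3, h4⟩ | ⟨h3, h4⟩ <;>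
    rcases abs_cases (a + b) with ⟨h5, h6⟩ | ⟨h5, h6⟩ <;>
    rcases abs_cases (a - b) with ⟨h7, h8⟩ | ⟨h7, h8⟩ <;> omega

lemma pv_ite_ite {c : Int} {A B : Prop} [Decidable A] [Decidable B] :
    (if A then (if B then c + 1 else c) else c) = (if A ∧ B then c + 1 else c) := by
  split_ifs <;> tauto

lemma A_closed (paths : List (List (Int × Int))) (threshold : Int) :
    calculate_manhattan_distances paths threshold = pvClosed paths threshold := by
  unfold calculate_manhattan_distances pvClosed
  simp only [PySem.List.pyRange_zero_natCast, List.foldl_map, PySem.List.pyGetD_natCast,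
    PySem.List.foldl_append_singleton_eq_map, List.nil_append]
  refine List.map_congr_left (fun i hi => ?_)
  refine List.map_congr_left (fun t ht => ?_)
  rw [PySem.List.foldl_congr_mem _ _ (fun (c : Int) (j : Nat) =>
      if (decide (j ≠ i ∧ t < pvLen paths j ∧
        |(pvPt paths i t).1 - (pvPt paths j t).1| + |(pvPt paths i t).2 - (pvPt paths j t).2| < threshold)) = true
      then c + 1 else c) _ ?_]
  · rw [PySem.List.foldl_count_if, zero_add, pvCnt]
  · intro c j hj
    rw [pv_ite_ite]
    refine if_congr ?_ rfl rfl
    simp only [decide_eq_true_eq, pvLen, pvPt, and_assoc, ne_eq, Nat.cast_inj, Nat.cast_lt]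

-- B's step function (identical to the lambda in the port)
def pvStepB (paths : List (List (Int × Int))) (threshold : Int) (rows : List (List Int)) (t : Nat) : List (List Int) :=
  let active := (PySem.List.enumerate paths 0).foldl (fun acc jp =>
    if t < jp.2.length then
      let q := PySem.List.pyGetD jp.2 (t : Int) (0, 0)
      acc ++ [(jp.1, q.1 + q.2, q.1 - q.2)]
    else acc) []
  (PySem.List.enumerate paths 0).foldl (fun nr ip =>
    if t < ip.2.length then
      let q := PySem.List.pyGetD ip.2 (t : Int) (0, 0)
      nr ++ [PySem.List.pyGetD rows ip.1 [] ++
             [altCount active threshold ip.1 (q.1 + q.2) (q.1 - q.2)]]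
    else nr ++ [PySem.List.pyGetD rows ip.1 []]) []

lemma B_as_fold (paths : List (List (Int × Int))) (threshold : Int) :
    calculate_manhattan_distances_alt paths threshold =
      (List.range (paths.foldl (fun a p => max a p.length) 0)).foldl (pvStepB paths threshold)
        (paths.map (fun _ => [])) := by
  unfold calculate_manhattan_distances_alt pvStepB
  rfl

lemma pv_active_eq (paths : List (List (Int × Int))) (t : Nat) :
    (PySem.List.enumerate paths 0).foldl (fun acc jp =>
      if t < jp.2.length then
        let q := PySem.List.pyGetD jp.2 (t : Int) (0, 0)
        acc ++ [(jp.1, q.1 + q.2, q.1 - q.2)]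
      else acc) [] =
    ((List.range paths.length).filter (fun j => t < pvLen paths j)).map
      (fun (j : Nat) => ((j : Int), (pvPt paths j t).1 + (pvPt paths j t).2, (pvPt paths j t).1 - (pvPt paths j t).2)) := by
  rw [PySem.List.enumerate_eq_map_pyRange paths []]
  simp only [PySem.List.len_eq, PySem.List.pyRange_zero_natCast, List.foldl_map, PySem.List.pyGetD_natCast]
  have h := PySem.List.foldl_append_if (fun j => decide (t < pvLen paths j))
      (fun (j : Nat) => ((j : Int), (pvPt paths j t).1 + (pvPt paths j t).2, (pvPt paths j t).1 - (pvPt paths j t).2))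
      (List.range paths.length) []
  simpa [pvLen, pvPt] using h

lemma pv_cnt_eq (paths : List (List (Int × Int))) (threshold : Int) (i t : Nat) :
    altCount (((List.range paths.length).filter (fun j => t < pvLen paths j)).map
        (fun (j : Nat) => ((j : Int), (pvPt paths j t).1 + (pvPt paths j t).2, (pvPt paths j t).1 - (pvPt paths j t).2)))
      threshold (i : Int) ((pvPt paths i t).1 + (pvPt paths i t).2) ((pvPt paths i t).1 - (pvPt paths i t).2)
      = pvCnt paths threshold i t := by
  unfold altCount pvCnt
  simp only [List.foldl_map]
  have h := PySem.List.foldl_count_if (fun (j : Nat) =>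
      decide ((j : Int) ≠ (i : Int) ∧
        |((pvPt paths i t).1 + (pvPt paths i t).2) - ((pvPt paths j t).1 + (pvPt paths j t).2)| < threshold ∧
        |((pvPt paths i t).1 - (pvPt paths i t).2) - ((pvPt paths j t).1 - (pvPt paths j t).2)| < threshold))
      ((List.range paths.length).filter (fun j => t < pvLen paths j)) 0
  simp only [decide_eq_true_eq, zero_add] at h
  rw [h, List.countP_filter]
  congr 1
  refine List.countP_congr (fun j hj => ?_)
  have hc := pv_cheb ((pvPt paths i t).1 - (pvPt paths j t).1) ((pvPt paths i t).2 - (pvPt paths j t).2) threshold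
  rw [show (pvPt paths i t).1 + (pvPt paths i t).2 - ((pvPt paths j t).1 + (pvPt paths j t).2)
        = ((pvPt paths i t).1 - (pvPt paths j t).1) + ((pvPt paths i t).2 - (pvPt paths j t).2) from by ring,
      show (pvPt paths i t).1 - (pvPt paths i t).2 - ((pvPt paths j t).1 - (pvPt paths j t).2)
        = ((pvPt paths i t).1 - (pvPt paths j t).1) - ((pvPt paths i t).2 - (pvPt paths j t).2) from by ring]
  simp only [Bool.and_eq_true, decide_eq_true_eq, Ne, Nat.cast_inj]
  tauto

lemma pv_step_spec (paths : List (List (Int × Int))) (threshold : Int) (t : Nat) :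
    pvStepB paths threshold
        ((List.range paths.length).map (fun i => (List.range (min t (pvLen paths i))).map (fun s => pvCnt paths threshold i s))) t
      = (List.range paths.length).map (fun i => (List.range (min (t + 1) (pvLen paths i))).map (fun s => pvCnt paths threshold i s)) := by
  unfold pvStepB
  rw [pv_active_eq, PySem.List.enumerate_eq_map_pyRange paths []]
  simp only [PySem.List.len_eq, PySem.List.pyRange_zero_natCast, List.foldl_map, PySem.List.pyGetD_natCast]
  rw [PySem.List.foldl_congr_mem _ _ (fun nr (j : Nat) => nr ++
        [(List.range (min (t + 1) (pvLen paths j))).map (fun s => pvCnt paths threshold j s)]) _ ?_]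
  · rw [PySem.List.foldl_append_singleton_eq_map, List.nil_append]
  · intro acc j hj
    have hj' := List.mem_range.mp hj
    have hrow : (List.map (fun i => List.map (fun s => pvCnt paths threshold i s) (List.range (min t (pvLen paths i))))
        (List.range paths.length)).getD j [] = (List.range (min t (pvLen paths j))).map (fun s => pvCnt paths threshold j s) :=
      PySem.List.getD_map_range _ _ _ _ hj'
    by_cases hc : t < (paths.getD j []).length
    · simp only [if_pos hc, hrow]
      have hq : (paths.getD j []).getD t (0, 0) = pvPt paths j t := rfl
      rw [hq, pv_cnt_eq]
      have h1 : min t (pvLen paths j) = t := by have hL : pvLen paths j = (paths.getD j []).length := rfl; omega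
      have h2 : min (t + 1) (pvLen paths j) = t + 1 := by have hL : pvLen paths j = (paths.getD j []).length := rfl; omega
      rw [h1, h2, List.range_succ, List.map_append, List.map_cons, List.map_nil]
    · simp only [if_neg hc, hrow]
      have h1 : min t (pvLen paths j) = min (t + 1) (pvLen paths j) := by have hL : pvLen paths j = (paths.getD j []).length := rfl; omega
      rw [h1]

lemma pv_inv (paths : List (List (Int × Int))) (threshold : Int) (t : Nat) :
    (List.range t).foldl (pvStepB paths threshold) (paths.map (fun _ => [])) =
      (List.range paths.length).map (fun i => (List.range (min t (pvLen paths i))).map (fun s => pvCnt paths threshold i s)) := by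
  induction t with
  | zero => simp [List.map_const']
  | succ t ih => rw [List.range_succ, List.foldl_append, ih, List.foldl_cons, List.foldl_nil, pv_step_spec]

lemma pv_len_le_T (paths : List (List (Int × Int))) (i : Nat) (hi : i < paths.length) :
    pvLen paths i ≤ paths.foldl (fun a p => max a p.length) 0 := by
  have hfold : paths.foldl (fun a p => max a p.length) 0 = (paths.map List.length).foldl max 0 := by
    rw [List.foldl_map]
  rw [hfold]
  refine (PySem.List.le_foldl_max _ _).2 _ (List.mem_map_of_mem ?_)
  rw [List.getD_eq_getElem _ _ hi]
  exact List.getElem_mem hi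

lemma B_closed (paths : List (List (Int × Int))) (threshold : Int) :
    calculate_manhattan_distances_alt paths threshold = pvClosed paths threshold := by
  rw [B_as_fold, pv_inv, pvClosed]
  refine List.map_congr_left (fun i hi => ?_)
  rw [Nat.min_eq_right (pv_len_le_T paths i (List.mem_range.mp hi))]

-- ===== VERDICT (by name: the statement is the Claim_ definition above) =====
theorem calculate_manhattan_distances_spec : Claim_equal_calculate_manhattan_distances := by
  intro paths th _
  unfold Spec_calculate_manhattan_distances
  rw [A_closed, B_closed]
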